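-- pv_equiv track=rewrite | github.com/aaron5630/Cuatro-en-raya-version-consola | 07 cuatro_en_raya.py | revisar_diagonal_izquierda
-- ===== SOURCE A (Python) =====
-- def revisar_diagonal_izquierda(tablero, color):
--     """
--     Esta función revisa si existe una secuencia de 4 caracteres consecutivas en las diagonales izquierdas
--     del tablero, retornando un True si se cumple, o False si no.
--     Argumentos:
--     <tablero> El conjunto de caracteres donde va a iterar y revisar si hay 4 caracteres consecutivos.
--     <color> El caracter que va a revisar para retornar True si se encuentran 4 caraceteres seguidos.
--     return True || False
--     """
--     for i in range(len(tablero)-3):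
--         for j in range(3, len(tablero[0])):
--             contador=0
--             for escalera in range(4):
--                 if tablero[i+escalera][j-escalera]==color:
--                     contador+=1
--                 else:
--                     break
--             if contador==4:
--                 return True
--     return False
-- ===== SOURCE B (Python) =====
-- def revisar_diagonal_izquierda(tablero, color):
--     """Single sweep keeping per-cell anti-diagonal run lengths (run ending at (i,j)
--     extends the run ending at (i-1,j+1)); returns True as soon as a run reaches 4."""
--     prev = []
--     for fila in tablero:
--         cur = []
--         for j in range(len(fila)):
--             if fila[j] == color:
--                 up = prev[j + 1] if j + 1 < len(prev) else 0
--                 v = up + 1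
--                 if v >= 4:
--                     return True
--             else:
--                 v = 0
--             cur.append(v)
--         prev = cur
--     return False
-- ===== Notes on version B (the rewrite author's own statement) =====
-- stated objective: faster
-- what changed: Replaces the triple nested loop (every start cell times a 4-step window scan) with a single sweep that carries per-cell anti-diagonal run lengths from the previous row, returning True the moment a run reaches 4.
import Mathlib
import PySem

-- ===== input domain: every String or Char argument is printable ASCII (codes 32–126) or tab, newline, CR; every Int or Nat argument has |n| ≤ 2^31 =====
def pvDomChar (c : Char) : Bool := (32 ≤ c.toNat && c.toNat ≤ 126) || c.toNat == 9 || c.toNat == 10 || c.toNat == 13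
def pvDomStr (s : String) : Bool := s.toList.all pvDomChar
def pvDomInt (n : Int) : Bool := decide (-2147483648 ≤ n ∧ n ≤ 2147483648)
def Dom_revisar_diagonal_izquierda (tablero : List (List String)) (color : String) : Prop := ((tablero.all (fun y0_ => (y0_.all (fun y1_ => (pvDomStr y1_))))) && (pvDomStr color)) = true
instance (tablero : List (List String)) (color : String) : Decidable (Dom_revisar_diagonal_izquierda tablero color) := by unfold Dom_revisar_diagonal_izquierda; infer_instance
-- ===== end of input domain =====

-- ===== PORT A =====
-- B replaces A's triple loop (each start cell + a 4-step window scan) by one sweep carrying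
-- per-cell anti-diagonal run lengths; proved equal on boards that are rectangular or have < 4 rows.
-- Port of A: an out-of-range access (where Python raises IndexError) yields `none` and is treated
-- as a mismatch; Pre_ excludes exactly the inputs where that can matter.
def pvContLoop (tablero : List (List String)) (color : String) (i j : Int) : List Int → Int → Int
  | [], contador => contador
  | escalera :: rest, contador =>
    if ((PySem.List.pyGet? tablero (i + escalera)).bind
        (fun fila => PySem.List.pyGet? fila (j - escalera))) = some color then
      pvContLoop tablero color i j rest (contador + 1)
    else contador

def pvJLoop (tablero : List (List String)) (color : String) (i : Int) : List Int → Bool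
  | [] => false
  | j :: rest =>
    if pvContLoop tablero color i j (PySem.List.pyRange 0 4 1) 0 = 4 then true
    else pvJLoop tablero color i rest

def pvILoop (tablero : List (List String)) (color : String) : List Int → Bool
  | [] => false
  | i :: rest =>
    if pvJLoop tablero color i (PySem.List.pyRange 3 (((tablero.head?).getD []).length : Int) 1) then
      true
    else pvILoop tablero color rest

def revisar_diagonal_izquierda (tablero : List (List String)) (color : String) : Bool :=
  pvILoop tablero color (PySem.List.pyRange 0 ((tablero.length : Int) - 3) 1)

-- ===== PORT B =====
-- row sweep of Source B: ptail is the suffix of the previous row's run list starting at index j+1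
-- (so `prev[j+1] if j+1 < len(prev) else 0` is its head, defaulting to 0); `none` is Python's
-- early `return True` when a run reaches 4, `some cur` is the finished row of run lengths.
def pvRowLoop (color : String) : List String → List Nat → List Nat → Option (List Nat)
  | [], _, cur => some cur.reverse
  | x :: rest, ptail, cur =>
    if x == color then
      let v := (ptail.headD 0) + 1
      if 4 ≤ v then none
      else pvRowLoop color rest ptail.tail (v :: cur)
    else pvRowLoop color rest ptail.tail (0 :: cur)

def pvRowsLoop (color : String) : List (List String) → List Nat → Bool
  | [], _ => false
  | fila :: rest, prev =>
    match pvRowLoop color fila prev.tail [] with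
    | none => true
    | some cur => pvRowsLoop color rest cur

def revisar_diagonal_izquierda_alt (tablero : List (List String)) (color : String) : Bool :=
  pvRowsLoop color tablero []

-- ===== PRECONDITION & SPEC =====
-- Pre_ excludes ragged boards that have at least 4 rows and a row wider than 3 cells: there A
-- may raise IndexError mid-scan, and where it happens to return, its answer (clipped to
-- len(tablero[0]) columns and cut short by break) is an accident of its scan order that a
-- whole-board sweep has no reason to reproduce.
def Pre_revisar_diagonal_izquierda (tablero : List (List String)) (color : String) : Prop :=
  tablero.length ≤ 3 ∨ (∀ fila ∈ tablero, fila.length ≤ 3) ∨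
    ∀ fila ∈ tablero, fila.length = ((tablero.head?).getD []).length

instance (tablero : List (List String)) (color : String) :
    Decidable (Pre_revisar_diagonal_izquierda tablero color) := by
  unfold Pre_revisar_diagonal_izquierda; infer_instance

def pvWitness_revisar_diagonal_izquierda : List (List String) × String :=
  ([["x", ".", ".", "x"], [".", ".", "x", "."], [".", "x", ".", "."], ["x", ".", ".", "."]], "x")

def Spec_revisar_diagonal_izquierda (tablero : List (List String)) (color : String) (out : Bool) : Prop := out = revisar_diagonal_izquierda_alt tablero color
instance (tablero : List (List String)) (color : String) (out : Bool) : Decidable (Spec_revisar_diagonal_izquierda tablero color out) := by unfold Spec_revisar_diagonal_izquierda; infer_instance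

-- ===== CLAIM (what is proved, stated in full; the proofs are below) =====
def Claim_equal_revisar_diagonal_izquierda : Prop := ∀ (tablero : List (List String)) (color : String), Dom_revisar_diagonal_izquierda tablero color → Pre_revisar_diagonal_izquierda tablero color → Spec_revisar_diagonal_izquierda tablero color (revisar_diagonal_izquierda tablero color)

-- ===== LEMMAS AND PROOFS =====

/-- cell (i, j) of the board, `none` when out of range. -/
def pvCell (tablero : List (List String)) (i j : Nat) : Option String :=
  (tablero[i]?).bind (fun fila => fila[j]?)

/-- length of the anti-diagonal run of `color` cells ending at (i, j), read upward-right. -/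
def pvRun (tablero : List (List String)) (color : String) : Nat → Nat → Nat
  | 0, j => if pvCell tablero 0 j = some color then 1 else 0
  | i + 1, j =>
    if pvCell tablero (i + 1) j = some color then pvRun tablero color i (j + 1) + 1 else 0

/-- the run list a finished row sweep leaves behind ([] before row 0). -/
def pvPrevRuns (tablero : List (List String)) (color : String) (i : Nat) : List Nat :=
  if i = 0 then []
  else (List.range ((tablero[i - 1]?).getD []).length).map (pvRun tablero color (i - 1))

theorem pvCell_lt (tablero : List (List String)) (i j : Nat) (s : String)
    (h : pvCell tablero i j = some s) :
    i < tablero.length ∧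
      ∃ fila, tablero[i]? = some fila ∧ j < fila.length ∧ fila[j]? = some s := by
  simp only [pvCell, Option.bind_eq_some_iff] at h
  obtain ⟨fila, hf, hj⟩ := h
  have hi := List.getElem?_eq_some_iff.mp hf
  have hjl := List.getElem?_eq_some_iff.mp hj
  exact ⟨hi.1, fila, hf, hjl.1, hj⟩


theorem pvRun_eq_zero_of_ge (tablero : List (List String)) (color : String) (i j : Nat)
    (h : ((tablero[i]?).getD []).length ≤ j) : pvRun tablero color i j = 0 := by
  have hc : pvCell tablero i j = none := by
    simp only [pvCell]
    cases hf : tablero[i]? with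
    | none => rfl
    | some fila =>
      simp only [hf, Option.getD_some] at h
      simp [List.getElem?_eq_none h]
  cases i <;> simp [pvRun, hc]


theorem pvRun_ge_iff (tablero : List (List String)) (color : String) :
    ∀ (n i j : Nat), n ≤ pvRun tablero color i j ↔
      n ≤ i + 1 ∧ ∀ e < n, pvCell tablero (i - e) (j + e) = some color := by
  intro n
  induction n with
  | zero => intro i j; simp
  | succ n ih =>
    intro i j
    cases i with
    | zero =>
      simp only [pvRun]
      split_ifs with hc
      · constructor
        · intro h
          have hn : n = 0 := by omega
          subst hn
          refine ⟨by omega, ?_⟩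
          intro e he
          have : e = 0 := by omega
          subst this; simpa using hc
        · rintro ⟨h1, _⟩; omega
      · constructor
        · intro h; omega
        · rintro ⟨h1, h2⟩
          have := h2 0 (by omega)
          simp at this
          exact absurd this hc
    | succ k =>
      simp only [pvRun]
      split_ifs with hc
      · rw [Nat.succ_le_succ_iff, ih k (j+1)]
        constructor
        · rintro ⟨h1, h2⟩
          refine ⟨by omega, ?_⟩
          intro e he
          cases e with
          | zero => simpa using hc
          | succ e' =>
            have := h2 e' (by omega)
            have hidx : k + 1 - (e' + 1) = k - e' := by omega
            have hj : j + (e' + 1) = j + 1 + e' := by omega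
            rw [hidx, hj]; exact this
        · rintro ⟨h1, h2⟩
          refine ⟨by omega, ?_⟩
          intro e he
          have := h2 (e + 1) (by omega)
          have hidx : k + 1 - (e + 1) = k - e := by omega
          have hj : j + (e + 1) = j + 1 + e := by omega
          rw [hidx, hj] at this; exact this
      · constructor
        · intro h; omega
        · rintro ⟨h1, h2⟩
          have := h2 0 (by omega)
          simp at this
          exact absurd this hc


theorem pvPrevRuns_headD (tablero : List (List String)) (color : String) (i k : Nat) :
    ((pvPrevRuns tablero color i).drop k).headD 0 =
      if i = 0 then 0 else pvRun tablero color (i - 1) k := by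
  unfold pvPrevRuns
  split_ifs with h
  · simp
  · set L := ((tablero[i - 1]?).getD []).length with hL
    by_cases hk : k < L
    · rw [List.headD_eq_head?_getD, List.head?_drop]
      simp [hk]
    · rw [List.headD_eq_head?_getD, List.head?_drop]
      have : ((List.range L).map (pvRun tablero color (i - 1)))[k]? = none := by
        apply List.getElem?_eq_none
        simpa using (by omega : L ≤ k)
      rw [this]
      simp [pvRun_eq_zero_of_ge tablero color (i-1) k (by omega)]


theorem pvRun_sub (tablero : List (List String)) (color : String) (i j : Nat) :
    pvRun tablero color i j =
      if pvCell tablero i j = some color then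
        (if i = 0 then 0 else pvRun tablero color (i - 1) (j + 1)) + 1
      else 0 := by
  cases i <;> simp [pvRun]

/-- row-sweep invariant: processing the suffix of row i from column j0. -/
theorem pvRowLoop_go (tablero : List (List String)) (color : String) (i : Nat)
    (fila : List String) (hfila : tablero[i]? = some fila) :
    ∀ (n j0 : Nat) (cur : List Nat), fila.length - j0 = n →
    pvRowLoop color (fila.drop j0) ((pvPrevRuns tablero color i).drop (j0 + 1)) cur =
      if ∃ j < fila.length, j0 ≤ j ∧ 4 ≤ pvRun tablero color i j then none
      else some (cur.reverse ++ (List.range' j0 (fila.length - j0)).map (pvRun tablero color i)) := by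
  intro n
  induction n with
  | zero =>
    intro j0 cur hn
    have hd : fila.drop j0 = [] := List.drop_eq_nil_of_le (by omega)
    rw [hd]
    have hex : ¬ ∃ j < fila.length, j0 ≤ j ∧ 4 ≤ pvRun tablero color i j := by
      rintro ⟨j, hj, hj0, _⟩; omega
    simp [pvRowLoop, hex, hn]
  | succ n ih =>
    intro j0 cur hn
    have hj0 : j0 < fila.length := by omega
    have hd : fila.drop j0 = fila[j0] :: fila.drop (j0 + 1) :=
      List.drop_eq_getElem_cons hj0
    rw [hd]
    have hcell : pvCell tablero i j0 = some fila[j0] := by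
      simp [pvCell, hfila, List.getElem?_eq_getElem hj0]
    have hup : ((pvPrevRuns tablero color i).drop (j0 + 1)).headD 0 =
        if i = 0 then 0 else pvRun tablero color (i - 1) (j0 + 1) :=
      pvPrevRuns_headD tablero color i (j0 + 1)
    have htail : ((pvPrevRuns tablero color i).drop (j0 + 1)).tail =
        (pvPrevRuns tablero color i).drop (j0 + 1 + 1) := by
      rw [List.tail_drop]
    have hrunj0 : pvRun tablero color i j0 =
        if fila[j0] == color then
          (if i = 0 then 0 else pvRun tablero color (i - 1) (j0 + 1)) + 1 else 0 := by
      rw [pvRun_sub, hcell]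
      by_cases hb : fila[j0] = color
      · simp [hb]
      · simp [hb, beq_iff_eq]
    by_cases hb : fila[j0] == color
    · simp only [pvRowLoop, hb, if_pos, hup]
      have hv : (if i = 0 then 0 else pvRun tablero color (i - 1) (j0 + 1)) + 1 =
          pvRun tablero color i j0 := by rw [hrunj0, if_pos hb]
      rw [hv]
      by_cases h4 : 4 ≤ pvRun tablero color i j0
      · rw [if_pos h4]
        have hex : ∃ j < fila.length, j0 ≤ j ∧ 4 ≤ pvRun tablero color i j :=
          ⟨j0, hj0, le_refl _, h4⟩
        rw [if_pos hex]
      · have hn' : fila.length - (j0 + 1) = n := by omega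
        rw [if_neg h4, htail, ih (j0 + 1) (pvRun tablero color i j0 :: cur) hn']
        have hiff : (∃ j < fila.length, j0 + 1 ≤ j ∧ 4 ≤ pvRun tablero color i j) ↔
            (∃ j < fila.length, j0 ≤ j ∧ 4 ≤ pvRun tablero color i j) := by
          constructor
          · rintro ⟨j, h1, h2, h3⟩; exact ⟨j, h1, by omega, h3⟩
          · rintro ⟨j, h1, h2, h3⟩
            rcases Nat.eq_or_lt_of_le h2 with rfl | hlt
            · exact absurd h3 h4
            · exact ⟨j, h1, by omega, h3⟩
        rw [if_congr hiff rfl rfl]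
        split_ifs with hex
        · rfl
        · congr 1
          have hr : List.range' j0 (fila.length - j0) = j0 :: List.range' (j0+1) (fila.length - (j0+1)) := by
            have : fila.length - j0 = (fila.length - (j0+1)) + 1 := by omega
            rw [this, List.range'_succ]
          rw [hr]
          simp
    · simp only [pvRowLoop, hb, if_neg, Bool.false_eq_true, not_false_eq_true, htail]
      have hz : pvRun tablero color i j0 = 0 := by rw [hrunj0, if_neg hb]
      have hn' : fila.length - (j0 + 1) = n := by omega
      rw [ih (j0 + 1) (0 :: cur) hn']
      have hiff : (∃ j < fila.length, j0 + 1 ≤ j ∧ 4 ≤ pvRun tablero color i j) ↔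
          (∃ j < fila.length, j0 ≤ j ∧ 4 ≤ pvRun tablero color i j) := by
        constructor
        · rintro ⟨j, h1, h2, h3⟩; exact ⟨j, h1, by omega, h3⟩
        · rintro ⟨j, h1, h2, h3⟩
          rcases Nat.eq_or_lt_of_le h2 with rfl | hlt
          · omega
          · exact ⟨j, h1, by omega, h3⟩
      rw [if_congr hiff rfl rfl]
      split_ifs with hex
      · rfl
      · congr 1
        have hr : List.range' j0 (fila.length - j0) = j0 :: List.range' (j0+1) (fila.length - (j0+1)) := by
          have : fila.length - j0 = (fila.length - (j0+1)) + 1 := by omega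
          rw [this, List.range'_succ]
        rw [hr]
        simp [hz]


theorem pvRun_pos_lt (tablero : List (List String)) (color : String) (r c : Nat)
    (h : 1 ≤ pvRun tablero color r c) : r < tablero.length := by
  have := ((pvRun_ge_iff tablero color 1 r c).mp h).2 0 (by omega)
  simpa using (pvCell_lt tablero r c color (by simpa using this)).1

theorem pvRowsLoop_go (tablero : List (List String)) (color : String) :
    ∀ (n i : Nat), tablero.length - i = n →
    (pvRowsLoop color (tablero.drop i) (pvPrevRuns tablero color i) = true ↔
      ∃ r c : Nat, i ≤ r ∧ 4 ≤ pvRun tablero color r c) := by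
  intro n
  induction n with
  | zero =>
    intro i hn
    have hd : tablero.drop i = [] := List.drop_eq_nil_of_le (by omega)
    rw [hd]
    simp only [pvRowsLoop, Bool.false_eq_true, false_iff]
    rintro ⟨r, c, hir, h4⟩
    have := pvRun_pos_lt tablero color r c (by omega)
    omega
  | succ n ih =>
    intro i hn
    have hi : i < tablero.length := by omega
    have hd : tablero.drop i = tablero[i] :: tablero.drop (i + 1) :=
      List.drop_eq_getElem_cons hi
    have hfila : tablero[i]? = some tablero[i] := List.getElem?_eq_getElem hi
    rw [hd]
    simp only [pvRowsLoop]
    have htail : (pvPrevRuns tablero color i).tail = (pvPrevRuns tablero color i).drop (0 + 1) := by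
      rw [show (0:Nat)+1 = 1 from rfl, List.drop_one]
    have hrl := pvRowLoop_go tablero color i tablero[i] hfila (tablero[i].length) 0 [] (by omega)
    rw [List.drop_zero] at hrl
    rw [htail, hrl]
    by_cases hex : ∃ j < tablero[i].length, 0 ≤ j ∧ 4 ≤ pvRun tablero color i j
    · rw [if_pos hex]
      simp only [true_iff]
      obtain ⟨j, hj, _, h4⟩ := hex
      exact ⟨i, j, le_refl _, h4⟩
    · rw [if_neg hex]
      have hcur : ([] : List Nat).reverse ++
          (List.range' 0 (tablero[i].length - 0)).map (pvRun tablero color i) =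
          pvPrevRuns tablero color (i + 1) := by
        simp [pvPrevRuns, hfila, List.range_eq_range']
      rw [hcur]
      rw [ih (i + 1) (by omega)]
      constructor
      · rintro ⟨r, c, hr, h4⟩; exact ⟨r, c, by omega, h4⟩
      · rintro ⟨r, c, hr, h4⟩
        rcases Nat.eq_or_lt_of_le hr with heq | hlt
        · exfalso
          subst heq
          by_cases hc : c < tablero[i].length
          · exact hex ⟨c, hc, by omega, h4⟩
          · have := pvRun_eq_zero_of_ge tablero color i c (by rw [hfila]; simpa using hc)
            omega
        · exact ⟨r, c, by omega, h4⟩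


/-- characterisation of B. -/
theorem pvB_eq_true (tablero : List (List String)) (color : String) :
    revisar_diagonal_izquierda_alt tablero color = true ↔
      ∃ r c : Nat, 4 ≤ pvRun tablero color r c := by
  have := pvRowsLoop_go tablero color (tablero.length) 0 (by omega)
  simp only [List.drop_zero] at this
  rw [revisar_diagonal_izquierda_alt]
  have hpr : pvPrevRuns tablero color 0 = [] := by simp [pvPrevRuns]
  rw [← hpr, this]
  constructor
  · rintro ⟨r, c, _, h⟩; exact ⟨r, c, h⟩
  · rintro ⟨r, c, h⟩; exact ⟨r, c, Nat.zero_le _, h⟩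


/-- A's inner count loop equals 4 iff all four window cells are in range and match. -/
theorem pvContLoop_eq_four (tablero : List (List String)) (color : String) (i j : Int) :
    pvContLoop tablero color i j (PySem.List.pyRange 0 4 1) 0 = 4 ↔
      ∀ e : Int, 0 ≤ e → e < 4 →
        ((PySem.List.pyGet? tablero (i + e)).bind
          (fun fila => PySem.List.pyGet? fila (j - e))) = some color := by
  have hr : PySem.List.pyRange 0 4 1 = [0, 1, 2, 3] := by decide
  rw [hr]
  simp only [pvContLoop]
  split_ifs with h0 h1 h2 h3 <;> constructor <;> intro h
  · intro e he0 he4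
    interval_cases e <;> assumption
  · rfl
  · omega
  · exact absurd (h 3 (by omega) (by omega)) h3
  · omega
  · exact absurd (h 2 (by omega) (by omega)) h2
  · omega
  · exact absurd (h 1 (by omega) (by omega)) h1
  · omega
  · exact absurd (h 0 (by omega) (by omega)) h0


theorem pvJLoop_eq_true (tablero : List (List String)) (color : String) (i : Int) (l : List Int) :
    pvJLoop tablero color i l = true ↔
      ∃ j ∈ l, pvContLoop tablero color i j (PySem.List.pyRange 0 4 1) 0 = 4 := by
  induction l with
  | nil => simp [pvJLoop]
  | cons j rest ih =>
    by_cases h : pvContLoop tablero color i j (PySem.List.pyRange 0 4 1) 0 = 4 <;>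
      simp [pvJLoop, h, ih]

theorem pvILoop_eq_true (tablero : List (List String)) (color : String) (l : List Int) :
    pvILoop tablero color l = true ↔
      ∃ i ∈ l, pvJLoop tablero color i
        (PySem.List.pyRange 3 (((tablero.head?).getD []).length : Int) 1) = true := by
  induction l with
  | nil => simp [pvILoop]
  | cons i rest ih =>
    by_cases h : pvJLoop tablero color i
        (PySem.List.pyRange 3 (((tablero.head?).getD []).length : Int) 1) <;>
      simp [pvILoop, h, ih]

/-- characterisation of A. -/
theorem pvA_eq_true (tablero : List (List String)) (color : String) :
    revisar_diagonal_izquierda tablero color = true ↔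
      ∃ i j : Nat, i + 4 ≤ tablero.length ∧ 3 ≤ j ∧ j < ((tablero.head?).getD []).length ∧
        ∀ e < 4, pvCell tablero (i + e) (j - e) = some color := by
  rw [revisar_diagonal_izquierda, pvILoop_eq_true]
  constructor
  · rintro ⟨i, hi, hj⟩
    rw [pvJLoop_eq_true] at hj
    obtain ⟨j, hjm, hc⟩ := hj
    rw [PySem.List.mem_pyRange_one] at hi hjm
    rw [pvContLoop_eq_four] at hc
    refine ⟨i.toNat, j.toNat, by omega, by omega, by omega, ?_⟩
    intro e he
    have h := hc (e : Int) (by omega) (by omega)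
    have h1 : i + (e : Int) = ((i.toNat + e : Nat) : Int) := by omega
    have h2 : j - (e : Int) = ((j.toNat - e : Nat) : Int) := by omega
    rw [h1, h2, PySem.List.pyGet?_natCast] at h
    unfold pvCell
    cases hf : tablero[i.toNat + e]? with
    | none => rw [hf] at h; simp at h
    | some fila => rw [hf] at h; simpa [PySem.List.pyGet?_natCast] using h
  · rintro ⟨i, j, hiL, hj3, hjC, hcells⟩
    refine ⟨(i : Int), ?_, ?_⟩
    · rw [PySem.List.mem_pyRange_one]; omega
    · rw [pvJLoop_eq_true]
      refine ⟨(j : Int), ?_, ?_⟩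
      · rw [PySem.List.mem_pyRange_one]; omega
      · rw [pvContLoop_eq_four]
        intro e he0 he4
        have h := hcells e.toNat (by omega)
        have h1 : (i : Int) + e = ((i + e.toNat : Nat) : Int) := by omega
        have h2 : (j : Int) - e = ((j - e.toNat : Nat) : Int) := by omega
        rw [h1, h2, PySem.List.pyGet?_natCast]
        unfold pvCell at h
        cases hf : tablero[i + e.toNat]? with
        | none => rw [hf] at h; simp at h
        | some fila => rw [hf] at h; simpa [PySem.List.pyGet?_natCast] using h


theorem pvWindow_iff_run (tablero : List (List String)) (color : String)
    (hpre : tablero.length ≤ 3 ∨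
      ∀ fila ∈ tablero, fila.length = ((tablero.head?).getD []).length) :
    (∃ i j : Nat, i + 4 ≤ tablero.length ∧ 3 ≤ j ∧ j < ((tablero.head?).getD []).length ∧
        ∀ e < 4, pvCell tablero (i + e) (j - e) = some color) ↔
      ∃ r c : Nat, 4 ≤ pvRun tablero color r c := by
  constructor
  · rintro ⟨i, j, hiL, hj3, hjC, hcells⟩
    refine ⟨i + 3, j - 3, ?_⟩
    rw [pvRun_ge_iff]
    refine ⟨by omega, ?_⟩
    intro e he
    have h := hcells (3 - e) (by omega)
    have h1 : i + 3 - e = i + (3 - e) := by omega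
    have h2 : j - 3 + e = j - (3 - e) := by omega
    rw [h1, h2]; exact h
  · rintro ⟨r, c, h4⟩
    rw [pvRun_ge_iff] at h4
    obtain ⟨hr4, hcells⟩ := h4
    have hc0 := hcells 0 (by omega)
    simp only [Nat.sub_zero, Nat.add_zero] at hc0
    have hrL := (pvCell_lt tablero r c color hc0).1
    have hc3 := hcells 3 (by omega)
    obtain ⟨_, fila, hfila, hlen, _⟩ := pvCell_lt tablero (r - 3) (c + 3) color hc3
    have hrect : ∀ fila ∈ tablero, fila.length = ((tablero.head?).getD []).length := by
      rcases hpre with h | h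
      · omega
      · exact h
    have hmem : fila ∈ tablero := List.mem_of_getElem? hfila
    have hC : fila.length = ((tablero.head?).getD []).length := hrect fila hmem
    refine ⟨r - 3, c + 3, by omega, by omega, by omega, ?_⟩
    intro e he
    have h := hcells (3 - e) (by omega)
    have h1 : r - 3 + e = r - (3 - e) := by omega
    have h2 : c + 3 - e = c + (3 - e) := by omega
    rw [h1, h2]; exact h

-- ===== VERDICT (by name: the statement is the Claim_ definition above) =====
theorem revisar_diagonal_izquierda_spec : Claim_equal_revisar_diagonal_izquierda := by
  intro tablero color _ hpre
  unfold Pre_revisar_diagonal_izquierda at hpre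
  unfold Spec_revisar_diagonal_izquierda
  rw [Bool.eq_iff_iff, pvA_eq_true, pvB_eq_true]
  rcases hpre with h | hall | h
  · exact pvWindow_iff_run tablero color (Or.inl h)
  · constructor
    · rintro ⟨i, j, _, hj3, hjC, _⟩
      exfalso
      have hC : ((tablero.head?).getD []).length ≤ 3 := by
        cases tablero with
        | nil => simp
        | cons r0 rest => simpa using hall r0 (List.mem_cons_self)
      omega
    · rintro ⟨r, c, h4⟩
      exfalso
      have hcell := ((pvRun_ge_iff tablero color 4 r c).mp h4).2 3 (by omega)
      obtain ⟨_, fila, hf, hlen, _⟩ := pvCell_lt tablero (r - 3) (c + 3) color hcell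
      have := hall fila (List.mem_of_getElem? hf)
      omega
  · exact pvWindow_iff_run tablero color (Or.inr h)
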